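-- pv_equiv track=rewrite | github.com/neetikasinghal/NLP-Projects | Hmm-POS-Tagger/hmmlearn3.py | process_doc
-- ===== SOURCE A (Python) =====
-- def process_doc(document):
--     start_states = dict()
--     transition_dict = dict()
--     emission_dict = dict()
--     word_dict = dict()
--     for line in document:
--         flag = 0
--         prev_tag = None
--         words = line.split(' ')
--         for word in words:
--             word_tag = word.rsplit('/',1)
--             tag = word_tag[1]
--             if flag == 0:
--                 flag = 1
--                 start_states[tag] = start_states[tag]+1 if start_states.get(tag) is not None else 1
--
--             if prev_tag is not None:
--                 if transition_dict.get(prev_tag) is None: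
--                     transition_dict[prev_tag] = dict()
--                 transition_dict[prev_tag][tag] = transition_dict[prev_tag][tag] + 1 if transition_dict[prev_tag].get(tag) is not None else 1
--
--             prev_tag = tag
--
--             emission_dict[tag] = emission_dict[tag]+1 if emission_dict.get(tag) is not None else 1
--
--             if word_dict.get(word_tag[0]) is None:
--                 word_dict[word_tag[0]] = dict()
--             word_dict[word_tag[0]][tag] = word_dict[word_tag[0]][tag]+1 if word_dict[word_tag[0]].get(tag) is not None else 1
--
--     return start_states, transition_dict, emission_dict, word_dict
-- ===== SOURCE B (Python) =====
-- def _tally(xs):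
--     out = {}
--     for x in xs:
--         out[x] = out.get(x, 0) + 1
--     return out
--
--
-- def _tally2(pairs):
--     out = {}
--     for a, b in pairs:
--         inner = out.setdefault(a, {})
--         inner[b] = inner.get(b, 0) + 1
--     return out
--
--
-- def process_doc(document):
--     sentences = [[w.rsplit('/', 1) for w in line.split(' ')] for line in document]
--     tagss = [[p[1] for p in sent] for sent in sentences]
--     start_states = _tally(ts[0] for ts in tagss)
--     emission_dict = _tally(t for ts in tagss for t in ts)
--     transition_dict = _tally2((a, b) for ts in tagss for a, b in zip(ts, ts[1:]))
--     word_dict = _tally2((p[0], p[1]) for sent in sentences for p in sent)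
--     return start_states, transition_dict, emission_dict, word_dict
-- ===== Notes on version B (the rewrite author's own statement) =====
-- stated objective: alternative
-- what changed: A threads flag/prev_tag state through one interleaved loop that updates all four dicts per word; B first parses every line into (word, tag) pairs, then builds each of the four tables by its own independent tally pass (zip of the tag list with its tail for transition bigrams).
import Mathlib
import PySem

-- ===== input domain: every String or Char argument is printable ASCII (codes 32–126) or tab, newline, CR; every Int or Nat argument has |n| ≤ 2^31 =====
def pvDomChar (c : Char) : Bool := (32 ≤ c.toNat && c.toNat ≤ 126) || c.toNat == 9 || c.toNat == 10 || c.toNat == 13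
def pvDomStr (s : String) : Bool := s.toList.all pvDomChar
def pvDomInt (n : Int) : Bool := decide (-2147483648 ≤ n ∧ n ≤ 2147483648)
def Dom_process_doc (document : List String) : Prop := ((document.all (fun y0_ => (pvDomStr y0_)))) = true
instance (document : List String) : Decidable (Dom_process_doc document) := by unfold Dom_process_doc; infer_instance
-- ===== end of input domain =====

-- B replaces A's single interleaved loop (flag/prev state, four dicts updated per word) by a
-- parse-then-tally decomposition: parse all lines into (word, tag) pairs first, then build each
-- of the four tables by its own independent tally pass (zip for transition bigrams).


-- ===== PORT A =====

-- hand port of w.rsplit('/', 1) (exact: Str.rfind is the highest index of '/', -1 if absent;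
-- Python returns [w] without a slash, else the parts before and after the last slash)
def rsplitSlash1 (w : String) : List String :=
  let i := PySem.Str.rfind w "/"
  if i = -1 then [w]
  else [String.ofList (w.toList.take i.toNat), String.ofList (w.toList.drop (i.toNat + 1))]

-- one iteration of A's inner `for word in words` loop; state = (flag, prev_tag, the four dicts).
-- word_tag[1] / word_tag[0] are pyGet? (IndexError = none, excluded by Pre_; .getD "" there).
def pdA_wordStep
    (st : Int × Option String × PySem.Dict String Int × PySem.Dict String (PySem.Dict String Int)
            × PySem.Dict String Int × PySem.Dict String (PySem.Dict String Int))
    (word : String) :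
    Int × Option String × PySem.Dict String Int × PySem.Dict String (PySem.Dict String Int)
      × PySem.Dict String Int × PySem.Dict String (PySem.Dict String Int) :=
  match st with
  | (flag, prev_tag, start_states, transition_dict, emission_dict, word_dict) =>
    let word_tag := rsplitSlash1 word
    let tag := (PySem.List.pyGet? word_tag 1).getD ""
    let flag' := if flag = 0 then 1 else flag
    let start' :=
      if flag = 0 then
        start_states.insert tag
          (match start_states.get? tag with | some v => v + 1 | none => 1)
      else start_states
    let trans' :=
      match prev_tag with
      | none => transition_dict
      | some p =>
        let t1 := if (transition_dict.get? p).isNone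
                  then transition_dict.insert p PySem.Dict.empty else transition_dict
        let inner := t1.getD p PySem.Dict.empty
        t1.insert p (inner.insert tag
          (match inner.get? tag with | some v => v + 1 | none => 1))
    let emission' := emission_dict.insert tag
      (match emission_dict.get? tag with | some v => v + 1 | none => 1)
    let w0 := (PySem.List.pyGet? word_tag 0).getD ""
    let w1 := if (word_dict.get? w0).isNone then word_dict.insert w0 PySem.Dict.empty else word_dict
    let innerW := w1.getD w0 PySem.Dict.empty
    let word' := w1.insert w0 (innerW.insert tag
      (match innerW.get? tag with | some v => v + 1 | none => 1))
    (flag', some tag, start', trans', emission', word')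

-- one iteration of A's outer `for line in document` loop (flag = 0, prev_tag = None reset per line)
def pdA_lineStep
    (acc : PySem.Dict String Int × PySem.Dict String (PySem.Dict String Int)
            × PySem.Dict String Int × PySem.Dict String (PySem.Dict String Int))
    (line : String) :
    PySem.Dict String Int × PySem.Dict String (PySem.Dict String Int)
      × PySem.Dict String Int × PySem.Dict String (PySem.Dict String Int) :=
  let words := (PySem.Str.split? line " ").getD []
  let r := words.foldl pdA_wordStep ((0 : Int), none, acc.1, acc.2.1, acc.2.2.1, acc.2.2.2)
  (r.2.2.1, r.2.2.2.1, r.2.2.2.2.1, r.2.2.2.2.2)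

def process_doc (document : List String) : (List (String × Int)) × (List (String × List (String × Int))) × (List (String × Int)) × (List (String × List (String × Int))) :=
  let r := document.foldl pdA_lineStep (PySem.Dict.empty, PySem.Dict.empty, PySem.Dict.empty, PySem.Dict.empty)
  (r.1.items, r.2.1.items.map (fun kv => (kv.1, kv.2.items)),
   r.2.2.1.items, r.2.2.2.items.map (fun kv => (kv.1, kv.2.items)))

-- ===== PORT B =====

def pdB_tagOf (p : List String) : String := (PySem.List.pyGet? p 1).getD ""

def pdB_pairOf (p : List String) : String × String :=
  ((PySem.List.pyGet? p 0).getD "", (PySem.List.pyGet? p 1).getD "")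

-- body of B's _tally loop: out[x] = out.get(x, 0) + 1
def pdB_bump (out : PySem.Dict String Int) (x : String) : PySem.Dict String Int :=
  out.insert x (out.getD x 0 + 1)

def pdB_tally (xs : List String) : PySem.Dict String Int :=
  xs.foldl pdB_bump PySem.Dict.empty

-- body of B's _tally2 loop: inner = out.setdefault(a, {}); inner[b] = inner.get(b, 0) + 1
def pdB_bump2 (out : PySem.Dict String (PySem.Dict String Int)) (ab : String × String) :
    PySem.Dict String (PySem.Dict String Int) :=
  let o := out.setdefault ab.1 PySem.Dict.empty
  let inner := o.getD ab.1 PySem.Dict.empty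
  o.insert ab.1 (inner.insert ab.2 (inner.getD ab.2 0 + 1))

def pdB_tally2 (ps : List (String × String)) : PySem.Dict String (PySem.Dict String Int) :=
  ps.foldl pdB_bump2 PySem.Dict.empty

def process_doc_alt (document : List String) : (List (String × Int)) × (List (String × List (String × Int))) × (List (String × Int)) × (List (String × List (String × Int))) :=
  let sentences := document.map (fun line => ((PySem.Str.split? line " ").getD []).map rsplitSlash1)
  let tagss := sentences.map (fun sent => sent.map pdB_tagOf)
  let start_states := pdB_tally (tagss.map (fun ts => (PySem.List.pyGet? ts 0).getD ""))
  let emission_dict := pdB_tally (tagss.flatMap (fun ts => ts))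
  let transition_dict := pdB_tally2 (tagss.flatMap (fun ts => ts.zip (PySem.List.slice ts (some 1) none)))
  let word_dict := pdB_tally2 (sentences.flatMap (fun sent => sent.map pdB_pairOf))
  (start_states.items, transition_dict.items.map (fun kv => (kv.1, kv.2.items)),
   emission_dict.items, word_dict.items.map (fun kv => (kv.1, kv.2.items)))

-- ===== PRECONDITION & SPEC =====
-- Pre_ excludes exactly the inputs where some space-separated token of a line contains no '/':
-- there word.rsplit('/', 1) has no element [1] and Python A raises IndexError (B raises too).
def Pre_process_doc (document : List String) : Prop :=
  ∀ line ∈ document, ∀ w ∈ (PySem.Str.split? line " ").getD [], PySem.Str.isIn "/" w = true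
instance (document : List String) : Decidable (Pre_process_doc document) := by
  unfold Pre_process_doc; infer_instance

def pvWitness_process_doc : List String := ["The/DT dog/NN runs/VBZ", "a/DT b/NN"]

def Spec_process_doc (document : List String) (out : (List (String × Int)) × (List (String × List (String × Int))) × (List (String × Int)) × (List (String × List (String × Int)))) : Prop := out = process_doc_alt document
instance (document : List String) (out : (List (String × Int)) × (List (String × List (String × Int))) × (List (String × Int)) × (List (String × List (String × Int)))) : Decidable (Spec_process_doc document out) := by
  unfold Spec_process_doc
  haveI d1 : DecidableEq (List (String × Int)) := inferInstance
  haveI d2 : DecidableEq (List (String × List (String × Int))) := inferInstance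
  exact @instDecidableEqProd _ _ d1 (@instDecidableEqProd _ _ d2 (@instDecidableEqProd _ _ d1 d2)) out (process_doc_alt document)

-- ===== CLAIM (what is proved, stated in full; the proofs are below) =====
def Claim_equal_process_doc : Prop := ∀ (document : List String), Dom_process_doc document → Pre_process_doc document → Spec_process_doc document (process_doc document)

-- ===== LEMMAS AND PROOFS =====

-- proof-only abbreviations
def tagW (w : String) : String := pdB_tagOf (rsplitSlash1 w)
def pairW (w : String) : String × String := pdB_pairOf (rsplitSlash1 w)
def wordsOf (line : String) : List String := (PySem.Str.split? line " ").getD []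
def tagsOf (line : String) : List String := (wordsOf line).map tagW

-- `line.split(' ')` is never empty
theorem go_ne_nil (sep : List Char) : ∀ (fuel : Nat) (l cur : List Char) (acc : List (List Char)),
    PySem.Chars.splitOn.go sep fuel l cur acc ≠ [] := by
  intro fuel
  induction fuel with
  | zero => intro l cur acc; simp [PySem.Chars.splitOn.go]
  | succ n ih =>
    intro l cur acc
    cases l with
    | nil => simp [PySem.Chars.splitOn.go]
    | cons c rest =>
      rw [PySem.Chars.splitOn.go]
      split
      · exact ih _ _ _
      · exact ih _ _ _

theorem wordsOf_ne_nil (line : String) : wordsOf line ≠ [] := by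
  simp [wordsOf, PySem.Str.split?, PySem.Chars.split?, PySem.Chars.splitOn]
  exact go_ne_nil _ _ _ _ _

-- A's `d[k] = d[k]+1 if d.get(k) is not None else 1` is B's bump
theorem bump_eq (d : PySem.Dict String Int) (k : String) :
    d.insert k (match d.get? k with | some v => v + 1 | none => 1) = pdB_bump d k := by
  cases h : d.get? k <;>
    simp [pdB_bump, PySem.Dict.getD_eq_get?_getD, h]

-- A's nested `if get is None: = dict(); [k][t] = ...+1 or 1` is B's setdefault bump
theorem bump2_eq (T : PySem.Dict String (PySem.Dict String Int)) (a b : String) :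
    ((if (T.get? a).isNone = true then T.insert a PySem.Dict.empty else T).insert a
      (((if (T.get? a).isNone = true then T.insert a PySem.Dict.empty else T).getD a PySem.Dict.empty).insert b
        (match ((if (T.get? a).isNone = true then T.insert a PySem.Dict.empty else T).getD a PySem.Dict.empty).get? b with
         | some v => v + 1 | none => 1)))
      = pdB_bump2 T (a, b) := by
  cases h : T.get? a with
  | none =>
    have hc : T.contains a = false := by rw [PySem.Dict.contains_eq_isSome_get?, h]; rfl
    simp [pdB_bump2, PySem.Dict.setdefault_of_not_contains, hc,
          PySem.Dict.getD_insert_self, PySem.Dict.getD_empty, PySem.Dict.get?_empty]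
  | some d' =>
    have hc : T.contains a = true := by rw [PySem.Dict.contains_eq_isSome_get?, h]; rfl
    have hd : T.getD a PySem.Dict.empty = d' := by
      rw [PySem.Dict.getD_eq_get?_getD, h]; rfl
    cases h2 : d'.get? b <;>
      simp [pdB_bump2, PySem.Dict.setdefault_of_contains, hc, hd, h2,
            PySem.Dict.getD_eq_get?_getD]

theorem pyGet_zero_cons (t : String) (l : List String) :
    (PySem.List.pyGet? (t :: l) 0).getD "" = t := by
  simp [PySem.List.pyGet?, PySem.List.pyIdx?]

-- first word of a line (flag = 0, prev_tag = None)
theorem wordStep_first (S E : PySem.Dict String Int)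
    (T W : PySem.Dict String (PySem.Dict String Int)) (w : String) :
    pdA_wordStep (0, none, S, T, E, W) w
      = (1, some (tagW w), pdB_bump S (tagW w), T, pdB_bump E (tagW w), pdB_bump2 W (pairW w)) := by
  simp only [pdA_wordStep, if_true]
  rw [bump_eq, bump_eq, bump2_eq]
  rfl

-- later words of a line (flag = 1, prev_tag = Some p)
theorem wordStep_rest (p : String) (S E : PySem.Dict String Int)
    (T W : PySem.Dict String (PySem.Dict String Int)) (w : String) :
    pdA_wordStep (1, some p, S, T, E, W) w
      = (1, some (tagW w), S, pdB_bump2 T (p, tagW w), pdB_bump E (tagW w), pdB_bump2 W (pairW w)) := by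
  simp only [pdA_wordStep, show ((1:Int) = 0) = False from by simp, if_false]
  rw [bump2_eq, bump2_eq, bump_eq]
  rfl

theorem foldWords_general (ws : List String) : ∀ (p : String)
    (S E : PySem.Dict String Int) (T W : PySem.Dict String (PySem.Dict String Int)),
    ws.foldl pdA_wordStep (1, some p, S, T, E, W)
      = ((1 : Int), ((ws.map tagW).foldl (fun _ t => some t) (some p)), S,
         (((p :: ws.map tagW).zip (ws.map tagW)).foldl pdB_bump2 T),
         ((ws.map tagW).foldl pdB_bump E),
         ((ws.map pairW).foldl pdB_bump2 W)) := by
  induction ws with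
  | nil => intro p S E T W; simp
  | cons w rest ih =>
    intro p S E T W
    simp only [List.foldl_cons, wordStep_rest, List.map_cons, List.zip_cons_cons]
    exact ih (tagW w) S (pdB_bump E (tagW w)) (pdB_bump2 T (p, tagW w)) (pdB_bump2 W (pairW w))

theorem lineStep_eq
    (acc : PySem.Dict String Int × PySem.Dict String (PySem.Dict String Int)
            × PySem.Dict String Int × PySem.Dict String (PySem.Dict String Int))
    (line : String) :
    pdA_lineStep acc line
      = (pdB_bump acc.1 ((PySem.List.pyGet? (tagsOf line) 0).getD ""),
         ((tagsOf line).zip (tagsOf line).tail).foldl pdB_bump2 acc.2.1,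
         (tagsOf line).foldl pdB_bump acc.2.2.1,
         ((wordsOf line).map pairW).foldl pdB_bump2 acc.2.2.2) := by
  cases hw : wordsOf line with
  | nil => exact absurd hw (wordsOf_ne_nil line)
  | cons w0 rest =>
    have hw' : (PySem.Str.split? line " ").getD [] = w0 :: rest := hw
    simp only [pdA_lineStep, hw', List.foldl_cons, wordStep_first, foldWords_general,
               tagsOf, hw, List.map_cons, List.tail_cons,
               pyGet_zero_cons]

theorem foldDoc (lines : List String) : ∀
    (S E : PySem.Dict String Int) (T W : PySem.Dict String (PySem.Dict String Int)),
    lines.foldl pdA_lineStep (S, T, E, W)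
      = ((lines.map (fun l => (PySem.List.pyGet? (tagsOf l) 0).getD "")).foldl pdB_bump S,
         (lines.flatMap (fun l => (tagsOf l).zip (tagsOf l).tail)).foldl pdB_bump2 T,
         (lines.flatMap tagsOf).foldl pdB_bump E,
         (lines.flatMap (fun l => (wordsOf l).map pairW)).foldl pdB_bump2 W) := by
  induction lines with
  | nil => intro S E T W; simp
  | cons l rest ih =>
    intro S E T W
    simp only [List.foldl_cons, lineStep_eq, List.map_cons, List.flatMap_cons, List.foldl_append]
    exact ih _ _ _ _

-- ===== VERDICT (by name: the statement is the Claim_ definition above) =====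
theorem process_doc_spec : Claim_equal_process_doc := by
  intro document _ _
  unfold Spec_process_doc process_doc process_doc_alt
  rw [foldDoc]
  simp only [pdB_tally, pdB_tally2, List.map_map, List.flatMap_map, List.map_map,
             PySem.List.slice_from_one]
  simp only [Function.comp_def, List.map_map]
  have htag : (fun w => pdB_tagOf (rsplitSlash1 w)) = tagW := rfl
  have hpair : (fun w => pdB_pairOf (rsplitSlash1 w)) = pairW := rfl
  simp only [htag, hpair, tagsOf, wordsOf]
  rfl
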